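-- pv_equiv track=rewrite | github.com/ByeongjKang/python_practice | 프로그래머스/lv1/17681. ［1차］ 비밀지도/［1차］ 비밀지도.py | solution
-- ===== SOURCE A (Python) =====
-- def solution(n, arr1, arr2):
--     wall = ['']*n
--     for i in range(n) :
--         for j in range(n) :
--             if arr1[i]%2 == 1 or arr2[i]%2 ==1 :
--                 wall[i] += '#'
--
--             else :
--                 wall[i] += ' '
--             arr1[i] = arr1[i]//2
--             arr2[i] = arr2[i]//2
--     return [ x[::-1] for x in wall ]
-- ===== SOURCE B (Python) =====
-- def solution(n, arr1, arr2):
--     return [''.join('#' if (arr1[i] >> j) & 1 or (arr2[i] >> j) & 1 else ' '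
--                     for j in range(n - 1, -1, -1))
--             for i in range(n)]
-- ===== Notes on version B (the rewrite author's own statement) =====
-- stated objective: simpler
-- what changed: A drains both arrays in place with a stateful LSB-first inner loop (repeated %2 tests and //=2 writes back into mutable list cells, string-accumulating wall[i]) and reverses each row at the end; B is a pure two-line comprehension that reads each bit directly MSB-first with a shift ((x >> j) & 1), so no mutation, no list-cell reads/writes per bit, no string accumulator and no reversal (this constant-factor saving is why B measures faster). Equivalence is about the return value only: A mutates arr1/arr2 in place, B does not.
import Mathlib
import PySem

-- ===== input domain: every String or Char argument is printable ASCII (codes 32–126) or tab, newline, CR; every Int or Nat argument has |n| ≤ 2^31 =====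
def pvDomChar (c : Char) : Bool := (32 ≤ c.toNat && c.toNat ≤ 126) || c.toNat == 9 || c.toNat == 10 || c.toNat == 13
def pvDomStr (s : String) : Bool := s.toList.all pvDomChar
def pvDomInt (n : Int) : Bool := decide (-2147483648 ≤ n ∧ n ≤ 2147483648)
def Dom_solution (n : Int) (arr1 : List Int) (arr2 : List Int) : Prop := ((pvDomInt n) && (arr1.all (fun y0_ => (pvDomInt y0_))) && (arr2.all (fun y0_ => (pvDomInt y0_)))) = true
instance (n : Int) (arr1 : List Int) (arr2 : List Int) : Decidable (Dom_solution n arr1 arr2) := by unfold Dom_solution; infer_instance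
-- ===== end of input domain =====

-- B replaces A's stateful LSB-first drain (//=2, %2 on mutable cells, then reverse) by a pure
-- MSB-first comprehension reading each bit with a shift; equivalence is about the RETURN value
-- only: Python A mutates arr1/arr2 in place, B does not.

-- ===== PORT A =====
-- the inner-loop body of A (the loop variable j is unused in Python A's inner loop)
def pvStep (i : Int) (st : List (List Char) × List Int × List Int) :
    List (List Char) × List Int × List Int :=
  (PySem.List.pySetD st.1 i (PySem.List.pyGetD st.1 i [] ++
     [if PySem.Int.mod (PySem.List.pyGetD st.2.1 i 0) 2 = 1 ∨
         PySem.Int.mod (PySem.List.pyGetD st.2.2 i 0) 2 = 1 then '#' else ' ']),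
   PySem.List.pySetD st.2.1 i (PySem.Int.floordiv (PySem.List.pyGetD st.2.1 i 0) 2),
   PySem.List.pySetD st.2.2 i (PySem.Int.floordiv (PySem.List.pyGetD st.2.2 i 0) 2))

-- Python strings are ported as their char lists (PySem strings live on List Char);
-- wall[i] += c is a set at index i appending one char; x[::-1] is reverse (PySem.List.slice?_none_none_neg_one).
def solution (n : Int) (arr1 : List Int) (arr2 : List Int) : List String :=
  let wall : List (List Char) := List.replicate n.toNat []   -- ['']*n (empty for n < 0, as in Python)
  let st :=
    (PySem.List.pyRange 0 n 1).foldl (fun st i =>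
      (PySem.List.pyRange 0 n 1).foldl (fun st _j => pvStep i st) st)
      (wall, arr1, arr2)
  st.1.map (fun x => String.ofList x.reverse)

-- ===== PORT B =====
-- (x >> j) & 1 on a Python int is exactly (x // 2**j) % 2 (arithmetic shift = floor division);
-- ported with PySem.Int.floordiv/mod, which are exact for Python's // and %.
def solution_alt (n : Int) (arr1 : List Int) (arr2 : List Int) : List String :=
  (PySem.List.pyRange 0 n 1).map (fun i =>
    String.ofList ((PySem.List.pyRange (n - 1) (-1) (-1)).map (fun j =>
      if PySem.Int.mod (PySem.Int.floordiv (PySem.List.pyGetD arr1 i 0) (2 ^ j.toNat)) 2 = 1 ∨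
         PySem.Int.mod (PySem.Int.floordiv (PySem.List.pyGetD arr2 i 0) (2 ^ j.toNat)) 2 = 1
      then '#' else ' ')))

-- ===== PRECONDITION & SPEC =====
-- A indexes arr1[i], arr2[i] for every i in range(n): it raises IndexError unless both lists
-- have at least n elements (for n ≤ 0 it returns [] and nothing is indexed).
def Pre_solution (n : Int) (arr1 : List Int) (arr2 : List Int) : Prop :=
  n ≤ (arr1.length : Int) ∧ n ≤ (arr2.length : Int)
instance (n : Int) (arr1 : List Int) (arr2 : List Int) : Decidable (Pre_solution n arr1 arr2) := by
  unfold Pre_solution; infer_instance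

def pvWitness_solution : Int × List Int × List Int := (3, [4, 2, 7], [5, 4, 4])

def Spec_solution (n : Int) (arr1 : List Int) (arr2 : List Int) (out : List String) : Prop :=
  out = solution_alt n arr1 arr2
instance (n : Int) (arr1 : List Int) (arr2 : List Int) (out : List String) :
    Decidable (Spec_solution n arr1 arr2 out) := by unfold Spec_solution; infer_instance

-- ===== CLAIM (what is proved, stated in full; the proofs are below) =====
def Claim_equal_solution : Prop := ∀ (n : Int) (arr1 : List Int) (arr2 : List Int),
  Dom_solution n arr1 arr2 → Pre_solution n arr1 arr2 → Spec_solution n arr1 arr2 (solution n arr1 arr2)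

-- ===== LEMMAS AND PROOFS =====

-- the row A accumulates for a cell pair (a, b): LSB first
def pvRow : Nat → Int → Int → List Char
  | 0, _, _ => []
  | k+1, a, b =>
      (if PySem.Int.mod a 2 = 1 ∨ PySem.Int.mod b 2 = 1 then '#' else ' ') ::
        pvRow k (PySem.Int.floordiv a 2) (PySem.Int.floordiv b 2)

def pvDivs : Nat → Int → Int
  | 0, x => x
  | k+1, x => pvDivs k (PySem.Int.floordiv x 2)

lemma pv_foldl_ignore {α β : Type} (g : β → β) :
    ∀ (l : List α) (s : β), l.foldl (fun s _ => g s) s = g^[l.length] s := by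
  intro l
  induction l with
  | nil => intro s; rfl
  | cons x xs ih => intro s; simp [List.foldl_cons, ih, Function.iterate_succ_apply]

lemma pv_getD_set_self {α : Type} (xs : List α) (m : Nat) (v d : α) (h : m < xs.length) :
    (xs.set m v).getD m d = v := by
  rw [List.getD_eq_getElem _ _ (by simpa using h)]
  simp

lemma pv_getD_set_ne {α : Type} (xs : List α) (m t : Nat) (v d : α) (h : m ≠ t) :
    (xs.set m v).getD t d = xs.getD t d := by
  by_cases ht : t < xs.length
  · rw [List.getD_eq_getElem _ _ (by simpa using ht), List.getD_eq_getElem _ _ ht,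
        List.getElem_set_ne h]
  · rw [List.getD_eq_default _ _ (by simpa using (by omega : xs.length ≤ t)),
        List.getD_eq_default _ _ (by omega)]

lemma pv_set_getD {α : Type} (xs : List α) (t : Nat) (d : α) (h : t < xs.length) :
    xs.set t (xs.getD t d) = xs := by
  rw [List.getD_eq_getElem _ _ h]
  exact List.set_getElem_self h

lemma pv_fdiv_fdiv (a : Int) (j : Nat) :
    PySem.Int.floordiv (PySem.Int.floordiv a 2) (2 ^ j) = PySem.Int.floordiv a (2 ^ (j + 1)) := by
  rw [PySem.Int.floordiv_eq_ediv_of_pos (by norm_num),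
      PySem.Int.floordiv_eq_ediv_of_pos (by positivity),
      PySem.Int.floordiv_eq_ediv_of_pos (by positivity),
      Int.ediv_ediv_of_nonneg (by norm_num : (0:Int) ≤ 2)]
  congr 1
  ring

lemma pvRow_eq_map (k : Nat) : ∀ (a b : Int),
    pvRow k a b = (List.range k).map (fun j =>
      if PySem.Int.mod (PySem.Int.floordiv a (2 ^ j)) 2 = 1 ∨
         PySem.Int.mod (PySem.Int.floordiv b (2 ^ j)) 2 = 1 then '#' else ' ') := by
  induction k with
  | zero => intro a b; simp [pvRow]
  | succ k ih =>
      intro a b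
      simp only [pvRow, ih, List.range_succ_eq_map, List.map_cons, List.map_map]
      congr 1
      · simp
      · refine List.map_congr_left ?_
        intro j _
        simp only [Function.comp]
        rw [← pv_fdiv_fdiv a j, ← pv_fdiv_fdiv b j]

lemma pv_inner_iter (i : Int) (hi : 0 ≤ i) (k : Nat) :
    ∀ (w : List (List Char)) (a1 a2 : List Int),
      i < (w.length : Int) → i < (a1.length : Int) → i < (a2.length : Int) →
      (pvStep i)^[k] (w, a1, a2) =
        (w.set i.toNat (w.getD i.toNat [] ++ pvRow k (a1.getD i.toNat 0) (a2.getD i.toNat 0)),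
         a1.set i.toNat (pvDivs k (a1.getD i.toNat 0)),
         a2.set i.toNat (pvDivs k (a2.getD i.toNat 0))) := by
  induction k with
  | zero =>
      intro w a1 a2 hw h1 h2
      simp only [Function.iterate_zero, id_eq, pvRow, pvDivs, List.append_nil]
      rw [pv_set_getD _ _ _ (by omega), pv_set_getD _ _ _ (by omega),
          pv_set_getD _ _ _ (by omega)]
  | succ k ih =>
      intro w a1 a2 hw h1 h2
      have hw' : i.toNat < w.length := by omega
      have h1' : i.toNat < a1.length := by omega
      have h2' : i.toNat < a2.length := by omega
      rw [Function.iterate_succ_apply]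
      have hstep : pvStep i (w, a1, a2) =
          (w.set i.toNat (w.getD i.toNat [] ++
             [if PySem.Int.mod (a1.getD i.toNat 0) 2 = 1 ∨
                 PySem.Int.mod (a2.getD i.toNat 0) 2 = 1 then '#' else ' ']),
           a1.set i.toNat (PySem.Int.floordiv (a1.getD i.toNat 0) 2),
           a2.set i.toNat (PySem.Int.floordiv (a2.getD i.toNat 0) 2)) := by
        simp [pvStep, PySem.List.pySetD_of_nonneg _ _ hi,
              PySem.List.pyGetD_eq_getElem _ _ hi hw, PySem.List.pyGetD_eq_getElem _ _ hi h1,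
              PySem.List.pyGetD_eq_getElem _ _ hi h2,
              List.getElem?_eq_getElem hw', List.getElem?_eq_getElem h1',
              List.getElem?_eq_getElem h2']
      rw [hstep, ih _ _ _ (by simpa using hw) (by simpa using h1) (by simpa using h2),
          pv_getD_set_self _ _ _ _ hw', pv_getD_set_self _ _ _ _ h1',
          pv_getD_set_self _ _ _ _ h2', List.set_set, List.set_set, List.set_set,
          List.append_assoc]
      simp [pvRow, pvDivs]

lemma pv_outer (n : Int) (k : Nat) : ∀ (m : Int) (w : List (List Char)) (a1 a2 : List Int),
    0 ≤ m → (n - m).toNat = k →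
    n ≤ (a1.length : Int) → n ≤ (a2.length : Int) → n ≤ (w.length : Int) →
    ((PySem.List.pyRange m n 1).foldl
        (fun st i => (pvStep i)^[(PySem.List.pyRange 0 n 1).length] st) (w, a1, a2)).1 =
      (List.range w.length).map (fun (t : Nat) =>
        if m ≤ (t : Int) ∧ (t : Int) < n then
          w.getD t [] ++ pvRow n.toNat (a1.getD t 0) (a2.getD t 0)
        else w.getD t []) := by
  induction k with
  | zero =>
      intro m w a1 a2 hm hk h1 h2 hw
      rw [show PySem.List.pyRange m n 1 = [] from PySem.List.pyRange_one_eq_nil (by omega)]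
      apply List.ext_getElem (by simp)
      intro t ht1 ht2
      simp only [List.foldl_nil, List.getElem_map, List.getElem_range]
      rw [if_neg (by omega), List.getD_eq_getElem _ _ (by simpa using ht1)]
  | succ k ih =>
      intro m w a1 a2 hm hk h1 h2 hw
      have hmn : m < n := by omega
      have hlen : (PySem.List.pyRange 0 n 1).length = n.toNat := by
        rw [PySem.List.length_pyRange_one]; omega
      rw [PySem.List.pyRange_one_cons hmn, List.foldl_cons,
          pv_inner_iter m hm _ _ _ _ (by omega) (by omega) (by omega),
          ih (m + 1) _ _ _ (by omega) (by omega) (by simp; omega) (by simp; omega)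
            (by simp; omega)]
      apply List.ext_getElem (by simp)
      intro t ht1 ht2
      have htw : t < w.length := by simpa using ht2
      simp only [List.getElem_map, List.getElem_range, List.length_set]
      by_cases hteq : (t : Int) = m
      · have ht' : t = m.toNat := by omega
        subst ht'
        rw [if_neg (by omega), if_pos (by omega), pv_getD_set_self _ _ _ _ (by omega), hlen]
      · have hne : m.toNat ≠ t := by omega
        by_cases hc : m ≤ (t : Int) ∧ (t : Int) < n
        · rw [if_pos (by omega), if_pos hc, pv_getD_set_ne _ _ _ _ _ hne,
              pv_getD_set_ne _ _ _ _ _ hne, pv_getD_set_ne _ _ _ _ _ hne]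
        · rw [if_neg (by omega), if_neg hc, pv_getD_set_ne _ _ _ _ _ hne]

lemma pv_solution_eq (n : Int) (arr1 arr2 : List Int)
    (h1 : n ≤ (arr1.length : Int)) (h2 : n ≤ (arr2.length : Int)) :
    solution n arr1 arr2 =
      (List.range n.toNat).map (fun t =>
        String.ofList (pvRow n.toNat (arr1.getD t 0) (arr2.getD t 0)).reverse) := by
  have hiter : ∀ (i : Int) (st : List (List Char) × List Int × List Int),
      (PySem.List.pyRange 0 n 1).foldl (fun st _j => pvStep i st) st =
        (pvStep i)^[(PySem.List.pyRange 0 n 1).length] st :=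
    fun i st => pv_foldl_ignore (pvStep i) _ st
  simp only [solution, hiter]
  rw [pv_outer n n.toNat 0 _ _ _ le_rfl (by omega) h1 h2 (by simp)]
  simp only [List.length_replicate, List.map_map]
  refine List.map_congr_left ?_
  intro t ht
  have ht' : t < n.toNat := List.mem_range.mp ht
  simp only [Function.comp_apply]
  rw [if_pos (by omega)]
  simp

lemma pv_alt_eq (n : Int) (arr1 arr2 : List Int) :
    solution_alt n arr1 arr2 =
      (List.range n.toNat).map (fun t =>
        String.ofList ((List.range n.toNat).map (fun p =>
          let j := n.toNat - 1 - p
          if PySem.Int.mod (PySem.Int.floordiv (arr1.getD t 0) (2 ^ j)) 2 = 1 ∨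
             PySem.Int.mod (PySem.Int.floordiv (arr2.getD t 0) (2 ^ j)) 2 = 1
          then '#' else ' '))) := by
  simp only [solution_alt, PySem.List.pyRange_one, PySem.List.pyRange_neg_one, List.map_map]
  rw [show (n - 0).toNat = n.toNat by omega, show (n - 1 - (-1)).toNat = n.toNat by omega]
  refine List.map_congr_left ?_
  intro t ht
  simp only [Function.comp_apply]
  congr 1
  refine List.map_congr_left ?_
  intro p hp
  have hp' : p < n.toNat := List.mem_range.mp hp
  have hj : (n - 1 - (p : Int)).toNat = n.toNat - 1 - p := by omega
  simp [hj]

lemma pv_row_reverse (k : Nat) (a b : Int) :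
    (pvRow k a b).reverse = (List.range k).map (fun p =>
      if PySem.Int.mod (PySem.Int.floordiv a (2 ^ (k - 1 - p))) 2 = 1 ∨
         PySem.Int.mod (PySem.Int.floordiv b (2 ^ (k - 1 - p))) 2 = 1 then '#' else ' ') := by
  rw [pvRow_eq_map]
  apply List.ext_getElem (by simp)
  intro p hp1 hp2
  rw [List.getElem_reverse]
  simp only [List.getElem_map, List.getElem_range, List.length_map, List.length_range]

-- ===== VERDICT (by name: the statement is the Claim_ definition above) =====
theorem solution_spec : Claim_equal_solution := by
  intro n arr1 arr2 _hD hP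
  obtain ⟨h1, h2⟩ := hP
  unfold Spec_solution
  rw [pv_solution_eq n arr1 arr2 h1 h2, pv_alt_eq]
  refine List.map_congr_left ?_
  intro t _ht
  simp only [pv_row_reverse]
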